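-- pv_equiv track=rewrite | github.com/xqms/clang-highlight | tools/generate_stl_overloads.py | lex_params
-- ===== SOURCE A (Python) =====
-- def lex_params(params: str, end: str = ')'):
--     # Stupid params lexer
--     ret = []
--     current_param = ''
--     level = 1
--
--     for idx, c in enumerate(params):
--         if level == 1:
--             if c == end:
--                 if current_param != '':
--                     ret.append(current_param)
--                 end_idx = idx + 1
--                 break
--
--             if c == ',':
--                 if current_param != '':
--                     ret.append(current_param)
--                 current_param = ''
--             else:
--                 current_param += c
--         else:
--             current_param += c
--
--         if c == '<':
--             level += 1
--         elif c == '>':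
--             level -= 1
--
--     assert level == 1
--     return [p.strip() for p in ret], params[end_idx:]
-- ===== SOURCE B (Python) =====
-- def lex_params(params: str, end: str = ')'):
--     # Two-phase lexer: repeatedly cut off one complete argument with a
--     # nesting-aware scanner, instead of one interleaved accumulator loop.
--     def split_one(s):
--         # Return (segment, rest) where rest starts at the first top-level
--         # ',' or `end` character ('' if there is none).
--         level = 1
--         for i, c in enumerate(s):
--             if level == 1 and (c == end or c == ','):
--                 return s[:i], s[i:]
--             if c == '<':
--                 level += 1
--             elif c == '>':
--                 level -= 1
--         return s, ''
--
--     segs = []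
--     rest = params
--     while True:
--         seg, rest = split_one(rest)
--         if seg != '':
--             segs.append(seg)
--         if rest == '':
--             raise ValueError('missing end delimiter')
--         if rest[0] == end:
--             tail = rest[1:]
--             break
--         rest = rest[1:]        # skip the top-level comma
--     return [s.strip() for s in segs], tail
-- ===== Notes on version B (the rewrite author's own statement) =====
-- stated objective: alternative
-- what changed: A's single interleaved loop with a current-param accumulator, break flag and end index is replaced by a two-phase lexer: a nesting-aware split_one helper that cuts off one complete top-level segment at a time, driven by an outer loop over the shrinking remainder (the remainder string after the terminator falls out directly instead of via a saved index).
import Mathlib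
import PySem

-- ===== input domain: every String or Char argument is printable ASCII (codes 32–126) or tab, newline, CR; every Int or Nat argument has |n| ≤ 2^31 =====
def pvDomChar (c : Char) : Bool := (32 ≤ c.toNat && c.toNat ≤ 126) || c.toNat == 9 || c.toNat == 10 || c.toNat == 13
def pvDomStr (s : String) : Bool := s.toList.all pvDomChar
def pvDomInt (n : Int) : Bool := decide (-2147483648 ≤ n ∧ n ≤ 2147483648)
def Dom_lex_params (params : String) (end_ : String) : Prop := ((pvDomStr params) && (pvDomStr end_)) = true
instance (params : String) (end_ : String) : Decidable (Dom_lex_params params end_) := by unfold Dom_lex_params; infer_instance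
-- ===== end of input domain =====

-- B restructures A's single interleaved accumulator loop into a two-phase lexer
-- (cut off one complete top-level segment at a time, then recurse on the rest);
-- objective: alternative decomposition, same cost. Return-value equivalence only.

-- ===== PORT A =====
-- level update of A's loop (applied after the branch on every non-breaking char)
def pvNextLv (lvl : Int) (c : Char) : Int :=
  if c = '<' then lvl + 1 else if c = '>' then lvl - 1 else lvl

-- `ret.append(current_param)` guarded by `current_param != ''`
def pvPushIf (ret : List (List Char)) (cur : List Char) : List (List Char) :=
  if cur ≠ [] then ret ++ [cur] else ret

-- A's for-loop; `none` = the loop falls off the end (Python raises: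
-- AssertionError or UnboundLocalError), `some (ret, end_idx)` = the break.
def lexA_loop (endc : List Char) : List Char → Nat → List (List Char) → List Char → Int →
    Option (List (List Char) × Nat)
  | [], _, _, _, _ => none
  | c :: rest, idx, ret, cur, lvl =>
    if lvl = 1 then
      if [c] = endc then some (pvPushIf ret cur, idx + 1)
      else if c = ',' then
        lexA_loop endc rest (idx + 1) (pvPushIf ret cur) [] (pvNextLv lvl c)
      else lexA_loop endc rest (idx + 1) ret (cur ++ [c]) (pvNextLv lvl c)
    else lexA_loop endc rest (idx + 1) ret (cur ++ [c]) (pvNextLv lvl c)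

def lex_params (params : String) (end_ : String) : List String × String :=
  match lexA_loop end_.toList params.toList 0 [] [] 1 with
  | some (ret, end_idx) =>
      -- params[end_idx:] with 0 ≤ end_idx is a plain drop
      (ret.map (fun p => PySem.Str.strip (String.mk p)), String.mk (params.toList.drop end_idx))
  | none => ([], "")   -- Python raises here; excluded by Pre_lex_params

-- ===== PORT B =====
-- Source B's split_one: (segment, rest) where rest starts at the first top-level ',' or end char
def lexB_splitOne (endc : List Char) : List Char → Int → List Char × List Char
  | [], _ => ([], [])
  | c :: r, lvl =>
    if lvl = 1 ∧ ([c] = endc ∨ c = ',') then ([], c :: r)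
    else
      let p := lexB_splitOne endc r (if c = '<' then lvl + 1 else if c = '>' then lvl - 1 else lvl)
      (c :: p.1, p.2)

-- Source B's `while True` loop (fuel = one unit per iteration; the loop consumes at
-- least one character per iteration, so length+1 fuel merely makes it total)
def lexB_loop (endc : List Char) : Nat → List Char → List (List Char) →
    List (List Char) × List Char
  | 0, _, segs => (segs, [])   -- fuel guard, never reached
  | f + 1, rest, segs =>
    let p := lexB_splitOne endc rest 1
    let segs' := if p.1 ≠ [] then segs ++ [p.1] else segs
    match p.2 with
    | [] => (segs', [])   -- Python B raises ValueError here; excluded by Pre_lex_params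
    | c :: r => if [c] = endc then (segs', r) else lexB_loop endc f r segs'

def lex_params_alt (params : String) (end_ : String) : List String × String :=
  let p := lexB_loop end_.toList (params.toList.length + 1) params.toList []
  (p.1.map (fun s => PySem.Str.strip (String.mk s)), String.mk p.2)

-- ===== PRECONDITION & SPEC =====
-- A raises (AssertionError / UnboundLocalError on end_idx) exactly when params has no
-- occurrence of the end character at angle-bracket level 1; Pre_ admits the rest.
-- (Level at index i is 1 + #'<' − #'>' over the prefix, a closed-form count.)
def Pre_lex_params (params : String) (end_ : String) : Prop :=
  ∃ i ∈ List.range params.toList.length,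
    end_.toList = [params.toList.getD i ' '] ∧
    (params.toList.take i).count '<' = (params.toList.take i).count '>'
instance (params : String) (end_ : String) : Decidable (Pre_lex_params params end_) := by
  unfold Pre_lex_params; infer_instance

def pvWitness_lex_params : String × String := ("a, b<c, d>)x", ")")

def Spec_lex_params (params : String) (end_ : String) (out : List String × String) : Prop :=
  out = lex_params_alt params end_
instance (params : String) (end_ : String) (out : List String × String) :
    Decidable (Spec_lex_params params end_ out) := by unfold Spec_lex_params; infer_instance

-- ===== CLAIM (what is proved, stated in full; the proofs are below) =====
def Claim_equal_lex_params : Prop := ∀ (params : String) (end_ : String),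
  Dom_lex_params params end_ → Pre_lex_params params end_ →
  Spec_lex_params params end_ (lex_params params end_)

-- ===== LEMMAS AND PROOFS =====

-- splitOne splits its input: segment ++ rest = input
theorem lexB_splitOne_append (endc : List Char) (s : List Char) (lvl : Int) :
    (lexB_splitOne endc s lvl).1 ++ (lexB_splitOne endc s lvl).2 = s := by
  induction s generalizing lvl with
  | nil => simp [lexB_splitOne]
  | cons c r ih =>
    simp only [lexB_splitOne]
    split
    · simp
    · simpa using ih (pvNextLv lvl c)

-- One segment of A's loop, phrased through B's splitOne.
theorem lexA_loop_eq_splitOne (endc : List Char) (s : List Char) (idx : Nat)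
    (ret : List (List Char)) (cur : List Char) (lvl : Int) :
    lexA_loop endc s idx ret cur lvl =
      match (lexB_splitOne endc s lvl).2 with
      | [] => none
      | c :: r =>
        if [c] = endc then
          some (pvPushIf ret (cur ++ (lexB_splitOne endc s lvl).1),
                idx + (lexB_splitOne endc s lvl).1.length + 1)
        else
          lexA_loop endc r (idx + (lexB_splitOne endc s lvl).1.length + 1)
            (pvPushIf ret (cur ++ (lexB_splitOne endc s lvl).1)) [] 1 := by
  induction s generalizing idx ret cur lvl with
  | nil => simp [lexA_loop, lexB_splitOne]
  | cons c r ih =>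
    by_cases hstop : lvl = 1 ∧ ([c] = endc ∨ c = ',')
    · -- the scanner stops at c
      obtain ⟨hl, hc⟩ := hstop
      by_cases hend : [c] = endc
      · simp [lexA_loop, lexB_splitOne, hl, hend]
      · have hcomma : c = ',' := hc.resolve_left hend
        subst hcomma hl
        simp [lexA_loop, lexB_splitOne, hend, pvNextLv]
    · -- c is consumed into the current segment
      have hrec : lexA_loop endc (c :: r) idx ret cur lvl =
          lexA_loop endc r (idx + 1) (if lvl = 1 ∧ c = ',' then pvPushIf ret cur else ret)
            (if lvl = 1 ∧ c = ',' then [] else cur ++ [c]) (pvNextLv lvl c) := by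
        by_cases hl : lvl = 1
        · subst hl
          have hend : ¬ [c] = endc := fun h => hstop ⟨rfl, Or.inl h⟩
          by_cases hcm : c = ','
          · exact absurd ⟨rfl, Or.inr hcm⟩ hstop
          · simp [lexA_loop, hend, hcm]
        · simp [lexA_loop, hl]
      have hcm : ¬ (lvl = 1 ∧ c = ',') := fun ⟨h1, h2⟩ => hstop ⟨h1, Or.inr h2⟩
      rw [hrec, if_neg hcm, if_neg hcm, ih]
      have hsplit : lexB_splitOne endc (c :: r) lvl =
          ((c :: (lexB_splitOne endc r (pvNextLv lvl c)).1),
            (lexB_splitOne endc r (pvNextLv lvl c)).2) := by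
        simp [lexB_splitOne, hstop, pvNextLv]
      rw [hsplit]
      rcases hr : (lexB_splitOne endc r (pvNextLv lvl c)).2 with _ | ⟨c', r'⟩
      · rfl
      · simp only []
        have harr : cur ++ c :: (lexB_splitOne endc r (pvNextLv lvl c)).1
            = (cur ++ [c]) ++ (lexB_splitOne endc r (pvNextLv lvl c)).1 := by simp
        have hidx : idx + (c :: (lexB_splitOne endc r (pvNextLv lvl c)).1).length + 1
            = idx + 1 + (lexB_splitOne endc r (pvNextLv lvl c)).1.length + 1 := by
          simp [List.length_cons]; omega
        rw [harr, hidx]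

-- dropping one whole segment plus its delimiter off an append
theorem pvDropLenSuccAppend (l1 l2 : List Char) (c : Char) (k : Nat) :
    (l1 ++ c :: l2).drop (l1.length + 1 + k) = l2.drop k := by
  rw [List.drop_append]
  rw [List.drop_eq_nil_of_le (by omega), List.nil_append]
  have h : l1.length + 1 + k - l1.length = k + 1 := by omega
  rw [h, List.drop_succ_cons]

-- If A's loop breaks, B's loop (with enough fuel) returns the same segments and
-- the rest after the break index (stated relative to the entry index).
theorem lexA_some_lexB (endc : List Char) :
    ∀ (f : Nat) (s : List Char) (idx : Nat) (segs : List (List Char)) r ei,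
      s.length < f →
      lexA_loop endc s idx segs [] 1 = some (r, ei) →
      idx ≤ ei ∧ ei - idx ≤ s.length ∧ lexB_loop endc f s segs = (r, s.drop (ei - idx)) := by
  intro f
  induction f with
  | zero => intro s idx segs r ei hf; omega
  | succ f ih =>
  intro s idx segs r ei hf hA
  rw [lexA_loop_eq_splitOne] at hA
  have happ := lexB_splitOne_append endc s 1
  rcases hsp : (lexB_splitOne endc s 1).2 with _ | ⟨c, rest⟩
  · rw [hsp] at hA; exact absurd hA (by simp)
  · rw [hsp] at hA happ
    simp only [] at hA
    obtain ⟨seg, hsegd⟩ : ∃ x, (lexB_splitOne endc s 1).1 = x := ⟨_, rfl⟩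
    rw [hsegd] at hA happ
    have hlen : s.length = seg.length + rest.length + 1 := by
      have h := congrArg List.length happ
      simp at h; omega
    by_cases hend : [c] = endc
    · rw [if_pos hend] at hA
      have h1 : pvPushIf segs ([] ++ seg) = r := by
        have := congrArg Prod.fst (Option.some.inj hA); simpa using this
      have h2 : idx + seg.length + 1 = ei := by
        have := congrArg Prod.snd (Option.some.inj hA); simpa using this
      refine ⟨by omega, by omega, ?_⟩
      rw [lexB_loop]
      simp only [hsp, hsegd, hend, if_pos]
      have hd : s.drop (ei - idx) = rest := by
        have h4 : ei - idx = seg.length + 1 := by omega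
        rw [h4, ← happ]
        simpa using pvDropLenSuccAppend seg rest c 0
      rw [hd, ← h1]
      simp [pvPushIf]
    · rw [if_neg hend] at hA
      have hrl : rest.length < f := by omega
      obtain ⟨h1, h2, h3⟩ := ih rest _ _ r ei hrl hA
      refine ⟨by omega, by omega, ?_⟩
      rw [lexB_loop]
      simp only [hsp, hsegd, hend, if_false]
      have hseg : (if seg ≠ [] then segs ++ [seg] else segs)
          = pvPushIf segs ([] ++ seg) := by
        simp [pvPushIf]
      rw [hseg, h3]
      congr 1
      have heq : ei - idx = (seg.length + 1) + (ei - (idx + seg.length + 1)) := by omega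
      rw [heq, ← happ]
      exact (pvDropLenSuccAppend seg rest c _).symm

-- one step of the prefix-count characterisation of the level counter
theorem pvNextLv_count_step (c : Char) (l : List Char) (lvl : Int) (j : Nat) :
    pvNextLv lvl c + (((l.take j).count '<' : Int) - ((l.take j).count '>' : Int)) =
    lvl + ((((c :: l).take (j+1)).count '<' : Int) - ((((c :: l).take (j+1))).count '>' : Int)) := by
  simp only [List.take_succ_cons, List.count_cons, beq_iff_eq, pvNextLv]
  by_cases h1 : c = '<'
  · subst h1; simp; omega
  · by_cases h2 : c = '>'
    · subst h2; simp; omega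
    · simp [h1, h2]

-- level invariant: if A's loop falls off the end, no level-1 end character exists
theorem lexA_none_no_witness (endc : List Char) :
    ∀ (s : List Char) (idx : Nat) (ret : List (List Char)) (cur : List Char) (lvl : Int),
      lexA_loop endc s idx ret cur lvl = none →
      ∀ i < s.length, ¬ (endc = [s.getD i ' '] ∧
        lvl + ((s.take i).count '<' - (s.take i).count '>' : Int) = 1) := by
  intro s
  induction s with
  | nil => intro idx ret cur lvl _ i hi; simp at hi
  | cons c r ih =>
    intro idx ret cur lvl hnone i hi
    have hstep : ∀ ret' cur', lexA_loop endc r (idx+1) ret' cur' (pvNextLv lvl c) = none →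
        ∀ j < r.length, ¬ (endc = [r.getD j ' '] ∧
          pvNextLv lvl c + ((r.take j).count '<' - (r.take j).count '>' : Int) = 1) :=
      fun ret' cur' h => ih (idx+1) ret' cur' (pvNextLv lvl c) h
    -- extract the recursive hypothesis and the head fact from hnone
    by_cases hl : lvl = 1
    · subst hl
      by_cases hend : [c] = endc
      · rw [lexA_loop] at hnone; simp [hend] at hnone
      · by_cases hcm : c = ','
        · rw [lexA_loop] at hnone
          simp only [if_neg hend, if_pos hcm] at hnone
          rcases i with _ | j
          · simp [List.getD]; intro h; exact hend (by rw [h])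
          · have hj : j < r.length := by simpa using hi
            have := hstep _ _ hnone j hj
            intro ⟨ha, hb⟩
            refine this ⟨by simpa using ha, ?_⟩
            rw [pvNextLv_count_step]; exact hb
        · rw [lexA_loop] at hnone
          simp only [if_neg hend, if_neg hcm] at hnone
          rcases i with _ | j
          · simp [List.getD]; intro h; exact hend (by rw [h])
          · have hj : j < r.length := by simpa using hi
            have := hstep _ _ hnone j hj
            intro ⟨ha, hb⟩
            refine this ⟨by simpa using ha, ?_⟩
            rw [pvNextLv_count_step]; exact hb
    · rw [lexA_loop, if_neg hl] at hnone
      rcases i with _ | j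
      · simp only [List.take_zero, List.count_nil, List.getD]
        intro ⟨_, hb⟩; omega
      · have hj : j < r.length := by simpa using hi
        have := hstep _ _ hnone j hj
        intro ⟨ha, hb⟩
        refine this ⟨by simpa using ha, ?_⟩
        rw [pvNextLv_count_step]; exact hb

theorem lexA_some_of_pre (params : String) (end_ : String)
    (h : Pre_lex_params params end_) :
    ∃ r ei, lexA_loop end_.toList params.toList 0 [] [] 1 = some (r, ei) := by
  rcases hA : lexA_loop end_.toList params.toList 0 [] [] 1 with _ | ⟨r, ei⟩
  · exfalso
    obtain ⟨i, hi, hend, hcnt⟩ := h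
    rw [List.mem_range] at hi
    exact lexA_none_no_witness end_.toList params.toList 0 [] [] 1 hA i hi
      ⟨hend, by rw [hcnt]; omega⟩
  · exact ⟨r, ei, rfl⟩

-- ===== VERDICT (by name: the statement is the Claim_ definition above) =====
theorem lex_params_spec : Claim_equal_lex_params := by
  intro params end_ _ hpre
  unfold Spec_lex_params lex_params lex_params_alt
  obtain ⟨r, ei, hA⟩ := lexA_some_of_pre params end_ hpre
  obtain ⟨h1, h2, h3⟩ := lexA_some_lexB end_.toList (params.toList.length + 1)
    params.toList 0 [] r ei (by omega) hA
  simp only [Nat.sub_zero] at h3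
  rw [hA, h3]
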